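-- pv_equiv track=rewrite | github.com/dhanna11/capstone | smartchess.py | interpreteBoardChange
-- ===== SOURCE A (Python) =====
-- nothing = -1
--
-- white = 0
--
-- black = 1
--
-- def interpreteBoardChange(newboardArray, oldboardArray):
--     assert (len(newboardArray) == len(oldboardArray))
--     dest_square = None
--     source_square = None
--     for i in range(len(newboardArray)):
--         # Castling handled as rook captures own piece
--         if ((newboardArray[i] != nothing) and (oldboardArray[i] == nothing)):
--             # white or black move
--             dest_square = i
--         elif (newboardArray[i] == white) and (oldboardArray[i] == black):
--             # black capture
--             dest_square = i
--         elif (newboardArray[i] == black) and (oldboardArray[i] == white):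
--             # white capture
--             dest_square = i
--         elif (newboardArray[i] == nothing) and (oldboardArray[i] != nothing):
--             # new blank place implies source.
--             # TODO: May break en_pasante captures?
--             source_square = i
--         else:
--             assert (newboardArray[i] == oldboardArray[i])
--
--     return (source_square, dest_square)
-- ===== SOURCE B (Python) =====
-- nothing = -1
--
-- white = 0
--
-- black = 1
--
-- def interpreteBoardChange(newboardArray, oldboardArray):
--     assert (len(newboardArray) == len(oldboardArray))
--     changed = [i for i in range(len(newboardArray)) if newboardArray[i] != oldboardArray[i]]
--     for i in changed:
--         # each changed cell must be a move (either side empty) or a capture (white<->black)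
--         assert (newboardArray[i] == nothing or oldboardArray[i] == nothing
--                 or {newboardArray[i], oldboardArray[i]} == {white, black})
--     source_square = max((i for i in changed if newboardArray[i] == nothing), default=None)
--     dest_square = max((i for i in changed if newboardArray[i] != nothing), default=None)
--     return (source_square, dest_square)
-- ===== Notes on version B (the rewrite author's own statement) =====
-- stated objective: simpler
-- what changed: Replaces A's stateful branch-by-branch scan with a declarative gather-then-max: collect the changed indices once, then source = max changed index whose new cell is empty and dest = max changed index whose new cell is occupied (last match wins because indices are increasing).
import Mathlib
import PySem

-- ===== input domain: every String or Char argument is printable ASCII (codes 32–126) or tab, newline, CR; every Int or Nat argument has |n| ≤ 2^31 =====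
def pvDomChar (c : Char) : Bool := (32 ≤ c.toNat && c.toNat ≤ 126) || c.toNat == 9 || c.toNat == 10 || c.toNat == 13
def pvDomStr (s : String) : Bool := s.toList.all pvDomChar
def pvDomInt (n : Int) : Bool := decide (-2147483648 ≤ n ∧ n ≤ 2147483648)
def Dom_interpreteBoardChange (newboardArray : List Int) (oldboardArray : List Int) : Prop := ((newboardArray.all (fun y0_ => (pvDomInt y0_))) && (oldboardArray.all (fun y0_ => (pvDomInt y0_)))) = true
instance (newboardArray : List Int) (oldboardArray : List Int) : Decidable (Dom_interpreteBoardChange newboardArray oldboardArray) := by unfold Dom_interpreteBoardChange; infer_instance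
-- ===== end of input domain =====

-- B is a different decomposition of the same one-pass task: gather changed indices, then take maxima; not faster, just plainer.

-- ===== PORT A =====
-- literal port of A's for-loop over range(len) with mutable (source_square, dest_square);
-- the final `assert newboardArray[i] == oldboardArray[i]` never fires under Pre_, so the
-- else branch leaves the state unchanged (on excluded inputs A raises AssertionError).
def interpreteBoardChange (newboardArray : List Int) (oldboardArray : List Int) : Option Int × Option Int :=
  (List.range newboardArray.length).foldl
    (fun (st : Option Int × Option Int) (i : Nat) =>
      let n := newboardArray.getD i 0
      let o := oldboardArray.getD i 0
      if n ≠ -1 ∧ o = -1 then (st.1, some (i : Int))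
      else if n = 0 ∧ o = 1 then (st.1, some (i : Int))
      else if n = 1 ∧ o = 0 then (st.1, some (i : Int))
      else if n = -1 ∧ o ≠ -1 then (some (i : Int), st.2)
      else st)
    (none, none)

-- ===== PORT B =====
-- literal port of Source B: the changed-index comprehension, then max(..., default=None)
-- over each filtered generator (ported as List.max?); Source B's validating assert loop over
-- `changed` never fires under Pre_ (outside Pre_ it raises AssertionError, like A).
def interpreteBoardChange_alt (newboardArray : List Int) (oldboardArray : List Int) : Option Int × Option Int :=
  let changed := (List.range newboardArray.length).filter
    (fun i => newboardArray.getD i 0 ≠ oldboardArray.getD i 0)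
  let source_square := ((changed.filter (fun i => newboardArray.getD i 0 = -1)).max?).map (Int.ofNat)
  let dest_square := ((changed.filter (fun i => newboardArray.getD i 0 ≠ -1)).max?).map (Int.ofNat)
  (source_square, dest_square)

-- ===== PRECONDITION & SPEC =====
-- Pre_ excludes exactly the inputs on which A raises AssertionError: unequal lengths, or
-- some position whose pair of cells is neither unchanged nor a legal move/capture pattern.
def Pre_interpreteBoardChange (newboardArray : List Int) (oldboardArray : List Int) : Prop :=
  newboardArray.length = oldboardArray.length ∧
  ∀ p ∈ newboardArray.zip oldboardArray,
    p.1 = p.2 ∨ p.1 = -1 ∨ p.2 = -1 ∨ (p.1 = 0 ∧ p.2 = 1) ∨ (p.1 = 1 ∧ p.2 = 0)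
instance (newboardArray : List Int) (oldboardArray : List Int) : Decidable (Pre_interpreteBoardChange newboardArray oldboardArray) := by unfold Pre_interpreteBoardChange; infer_instance

def pvWitness_interpreteBoardChange : List Int × List Int := ([-1, 0, 5, -1], [0, 0, 5, 1])

def Spec_interpreteBoardChange (newboardArray : List Int) (oldboardArray : List Int) (out : Option Int × Option Int) : Prop := out = interpreteBoardChange_alt newboardArray oldboardArray
instance (newboardArray : List Int) (oldboardArray : List Int) (out : Option Int × Option Int) : Decidable (Spec_interpreteBoardChange newboardArray oldboardArray out) := by unfold Spec_interpreteBoardChange; infer_instance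

-- ===== CLAIM (what is proved, stated in full; the proofs are below) =====
def Claim_equal_interpreteBoardChange : Prop := ∀ (newboardArray : List Int) (oldboardArray : List Int), Dom_interpreteBoardChange newboardArray oldboardArray → Pre_interpreteBoardChange newboardArray oldboardArray → Spec_interpreteBoardChange newboardArray oldboardArray (interpreteBoardChange newboardArray oldboardArray)

-- ===== LEMMAS AND PROOFS =====

-- A's loop body, named for the proofs
def pvStep (newA oldA : List Int) (st : Option Int × Option Int) (i : Nat) : Option Int × Option Int :=
  if newA.getD i 0 ≠ -1 ∧ oldA.getD i 0 = -1 then (st.1, some (i : Int))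
  else if newA.getD i 0 = 0 ∧ oldA.getD i 0 = 1 then (st.1, some (i : Int))
  else if newA.getD i 0 = 1 ∧ oldA.getD i 0 = 0 then (st.1, some (i : Int))
  else if newA.getD i 0 = -1 ∧ oldA.getD i 0 ≠ -1 then (some (i : Int), st.2)
  else st

-- B's pair of maxima restricted to the first n indices, named for the proofs
def pvAlt (newA oldA : List Int) (n : Nat) : Option Int × Option Int :=
  let changed := (List.range n).filter (fun i => newA.getD i 0 ≠ oldA.getD i 0)
  (((changed.filter (fun i => newA.getD i 0 = -1)).max?).map (Int.ofNat),
   ((changed.filter (fun i => newA.getD i 0 ≠ -1)).max?).map (Int.ofNat))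

lemma interpreteBoardChange_eq_foldl (newA oldA : List Int) :
    interpreteBoardChange newA oldA =
      (List.range newA.length).foldl (pvStep newA oldA) (none, none) := rfl

lemma interpreteBoardChange_alt_eq (newA oldA : List Int) :
    interpreteBoardChange_alt newA oldA = pvAlt newA oldA newA.length := rfl

lemma pvStep_unchanged (newA oldA : List Int) (st : Option Int × Option Int) (i : Nat)
    (h : newA.getD i 0 = oldA.getD i 0) : pvStep newA oldA st i = st := by
  unfold pvStep
  split_ifs <;> first | rfl | (exfalso; omega)

lemma pvStep_source (newA oldA : List Int) (st : Option Int × Option Int) (i : Nat)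
    (h1 : newA.getD i 0 = -1) (h2 : oldA.getD i 0 ≠ -1) :
    pvStep newA oldA st i = (some (i : Int), st.2) := by
  unfold pvStep
  split_ifs <;> first | rfl | (exfalso; omega)

lemma pvStep_dest (newA oldA : List Int) (st : Option Int × Option Int) (i : Nat)
    (h1 : newA.getD i 0 ≠ -1) (h2 : newA.getD i 0 ≠ oldA.getD i 0)
    (hv : newA.getD i 0 = oldA.getD i 0 ∨ newA.getD i 0 = -1 ∨ oldA.getD i 0 = -1 ∨
      (newA.getD i 0 = 0 ∧ oldA.getD i 0 = 1) ∨ (newA.getD i 0 = 1 ∧ oldA.getD i 0 = 0)) :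
    pvStep newA oldA st i = (st.1, some (i : Int)) := by
  unfold pvStep
  split_ifs <;> first | rfl | (exfalso; omega)

-- max? of a list of naturals all < n, with n appended, is n
lemma max?_append_lt {xs : List Nat} {n : Nat} (h : ∀ x ∈ xs, x < n) :
    (xs ++ [n]).max? = some n := by
  induction xs with
  | nil => simp [List.max?]
  | cons a t ih =>
    have ha := h a (by simp)
    have ht := ih (fun x hx => h x (by simp [hx]))
    simp only [List.cons_append, List.max?_cons, ht]
    simp [Nat.max_eq_right (Nat.le_of_lt ha)]

lemma filt_lt (p q : Nat → Bool) (n : Nat) :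
    ∀ x ∈ ((List.range n).filter p).filter q, x < n := by
  intro x hx
  have := List.mem_of_mem_filter (List.mem_of_mem_filter hx)
  simpa using List.mem_range.mp this

-- pvAlt at n+1 in the three cases
lemma pvAlt_succ_unchanged (newA oldA : List Int) (n : Nat)
    (h : newA.getD n 0 = oldA.getD n 0) :
    pvAlt newA oldA (n + 1) = pvAlt newA oldA n := by
  unfold pvAlt
  have hpn : (List.filter (fun i => decide (newA.getD i 0 ≠ oldA.getD i 0)) [n]) = [] := by
    rw [List.filter_cons]
    simp only [h]
    simp
  rw [List.range_succ, List.filter_append, hpn, List.append_nil]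

lemma pvAlt_succ_source (newA oldA : List Int) (n : Nat)
    (h1 : newA.getD n 0 = -1) (h2 : newA.getD n 0 ≠ oldA.getD n 0) :
    pvAlt newA oldA (n + 1) = (some (n : Int), (pvAlt newA oldA n).2) := by
  unfold pvAlt
  have hpn : decide (newA.getD n 0 ≠ oldA.getD n 0) = true := by simpa using h2
  have hq1 : decide (newA.getD n 0 = -1) = true := by simpa using h1
  have hq2 : decide (newA.getD n 0 ≠ -1) = false := by simpa using h1
  simp only [List.range_succ, List.filter_append, List.filter_cons, List.filter_nil, hpn, hq1,
    hq2, if_true]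
  rw [max?_append_lt (filt_lt _ _ n)]
  simp

lemma pvAlt_succ_dest (newA oldA : List Int) (n : Nat)
    (h1 : newA.getD n 0 ≠ -1) (h2 : newA.getD n 0 ≠ oldA.getD n 0) :
    pvAlt newA oldA (n + 1) = ((pvAlt newA oldA n).1, some (n : Int)) := by
  unfold pvAlt
  have hpn : decide (newA.getD n 0 ≠ oldA.getD n 0) = true := by simpa using h2
  have hq1 : decide (newA.getD n 0 = -1) = false := by simpa using h1
  have hq2 : decide (newA.getD n 0 ≠ -1) = true := by simpa using h1
  simp only [List.range_succ, List.filter_append, List.filter_cons, List.filter_nil, hpn, hq1,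
    hq2, if_true]
  rw [max?_append_lt (filt_lt _ _ n)]
  simp

lemma invariant (newA oldA : List Int)
    (hlen : newA.length = oldA.length)
    (hv : ∀ p ∈ newA.zip oldA,
      p.1 = p.2 ∨ p.1 = -1 ∨ p.2 = -1 ∨ (p.1 = 0 ∧ p.2 = 1) ∨ (p.1 = 1 ∧ p.2 = 0)) :
    ∀ n, n ≤ newA.length →
      (List.range n).foldl (pvStep newA oldA) (none, none) = pvAlt newA oldA n := by
  intro n hn
  induction n with
  | zero => simp [pvAlt, List.max?]
  | succ m ih =>
    have hm : m ≤ newA.length := Nat.le_of_succ_le hn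
    have hrec := ih hm
    have hmlt : m < newA.length := hn
    have hmo : m < oldA.length := by omega
    have hgn : newA.getD m 0 = newA[m] := List.getD_eq_getElem _ _ hmlt
    have hgo : oldA.getD m 0 = oldA[m] := List.getD_eq_getElem _ _ hmo
    have hz : m < (newA.zip oldA).length := by
      rw [List.length_zip]; omega
    have hmem : (newA[m], oldA[m]) ∈ newA.zip oldA := by
      have hget : (newA.zip oldA)[m] = (newA[m], oldA[m]) := List.getElem_zip ..
      rw [← hget]
      exact List.getElem_mem _
    have hvp := hv _ hmem
    rw [← hgn, ← hgo] at hvp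
    rw [List.range_succ, List.foldl_append, hrec, List.foldl_cons, List.foldl_nil]
    by_cases hch : newA.getD m 0 = oldA.getD m 0
    · rw [pvStep_unchanged _ _ _ _ hch, pvAlt_succ_unchanged _ _ _ hch]
    · by_cases hnil : newA.getD m 0 = -1
      · have hon : oldA.getD m 0 ≠ -1 := fun h => hch (hnil.trans h.symm)
        rw [pvStep_source _ _ _ _ hnil hon, pvAlt_succ_source _ _ _ hnil hch]
      · rw [pvStep_dest _ _ _ _ hnil hch hvp, pvAlt_succ_dest _ _ _ hnil hch]

-- ===== VERDICT (by name: the statement is the Claim_ definition above) =====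
theorem interpreteBoardChange_spec : Claim_equal_interpreteBoardChange := by
  intro newboardArray oldboardArray _ hpre
  obtain ⟨hlen, hv⟩ := hpre
  unfold Spec_interpreteBoardChange
  rw [interpreteBoardChange_eq_foldl, interpreteBoardChange_alt_eq]
  exact invariant newboardArray oldboardArray hlen hv newboardArray.length (le_refl _)
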